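-- pv_equiv track=rewrite | github.com/Kiva-Entertainment/yohk | script/time/displayTurnOrder.py | formTimelineText
-- ===== SOURCE A (Python) =====
-- MAX_LINES = 40
--
-- def formTimelineText(timeline):
-- 	text = ''
--
-- 	# Form full text
-- 	for turn in timeline:
--
-- 		for group in turn:
--
-- 			if group != []:
-- 				for unit in group:
-- 					text += unit + '\n'
-- 				text += '\n'
--
-- 	# Crop to fit max lines
-- 	# NOTE(kgeffen) Even last line has a trailing newline
-- 	if text.count('\n') > MAX_LINES:
--
-- 		fittingText = ''
-- 		textLines = text.split('\n')
-- 		for i in range(MAX_LINES):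
-- 			fittingText += textLines[i] + '\n'
--
-- 		return fittingText
--
-- 	return text
-- ===== SOURCE B (Python) =====
-- MAX_LINES = 40
--
-- def formTimelineText(timeline):
-- 	# Stream the display lines from a generator and stop as soon as
-- 	# MAX_LINES lines have been emitted: the full text is never built and
-- 	# no count/split/re-loop crop pass is needed (the <= MAX_LINES case and
-- 	# the crop case are the same code path).
-- 	def lines():
-- 		for turn in timeline:
-- 			for group in turn:
-- 				if group != []:
-- 					for unit in group:
-- 						yield from unit.split('\n')
-- 					yield ''
-- 	out = []
-- 	for line in lines():
-- 		out.append(line + '\n')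
-- 		if len(out) == MAX_LINES:
-- 			break
-- 	return ''.join(out)
-- ===== Notes on version B (the rewrite author's own statement) =====
-- stated objective: faster
-- what changed: B streams the display lines from a generator and breaks out of one consuming loop as soon as 40 lines are emitted, so the full text is never materialised and A's count/split/re-loop crop pass (and its two-branch structure) disappears; work is bounded by the input consumed to produce 40 lines.
import Mathlib
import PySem

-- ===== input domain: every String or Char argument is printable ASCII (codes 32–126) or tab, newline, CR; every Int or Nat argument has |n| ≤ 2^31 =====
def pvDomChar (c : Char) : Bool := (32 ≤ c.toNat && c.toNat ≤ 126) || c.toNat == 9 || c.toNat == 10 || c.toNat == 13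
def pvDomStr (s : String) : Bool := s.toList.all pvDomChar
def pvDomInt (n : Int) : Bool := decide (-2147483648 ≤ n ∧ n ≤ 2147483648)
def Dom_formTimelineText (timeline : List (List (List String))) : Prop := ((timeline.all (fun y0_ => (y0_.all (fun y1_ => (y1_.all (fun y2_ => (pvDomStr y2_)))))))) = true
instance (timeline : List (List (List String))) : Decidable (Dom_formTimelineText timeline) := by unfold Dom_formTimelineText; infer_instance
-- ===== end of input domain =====

-- B streams the display lines and stops after 40 have been emitted, instead of
-- building the full text and cropping it with a count/split/re-loop pass.

-- ===== PORT A =====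
-- text is kept as List Char (Python str, exact on the domain via PySem.Chars).
def formTimelineText (timeline : List (List (List String))) : String :=
  let text : List Char :=
    timeline.foldl (fun text turn =>
      turn.foldl (fun text group =>
        if group ≠ [] then
          (group.foldl (fun t (unit : String) => t ++ unit.toList ++ ['\n']) text) ++ ['\n']
        else text) text) []
  if PySem.Chars.count text ['\n'] > 40 then
    let textLines := PySem.Chars.splitOn text ['\n']
    String.ofList ((PySem.List.pyRange 0 40 1).foldl
      (fun ft i => ft ++ PySem.List.pyGetD textLines i [] ++ ['\n']) [])
  else String.ofList text

-- ===== PORT B =====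
-- The consuming 'for line in lines(): append; if len(out)==40: break' loop.
def pvTakeLoop : List (List Char) → List (List Char) → List (List Char)
  | [], out => out
  | l :: rest, out =>
    let out' := out ++ [l ++ ['\n']]
    if out'.length = 40 then out' else pvTakeLoop rest out'

def formTimelineText_alt (timeline : List (List (List String))) : String :=
  -- the generator lines(): yielded elements in order
  let lines : List (List Char) :=
    timeline.flatMap (fun turn => turn.flatMap (fun group =>
      if group ≠ [] then
        group.flatMap (fun (unit : String) => PySem.Chars.splitOn unit.toList ['\n']) ++ [[]]
      else []))
  String.ofList (pvTakeLoop lines []).flatten   -- ''.join(out)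

-- ===== PRECONDITION & SPEC =====
def Spec_formTimelineText (timeline : List (List (List String))) (out : String) : Prop := out = formTimelineText_alt timeline
instance (timeline : List (List (List String))) (out : String) : Decidable (Spec_formTimelineText timeline out) := by unfold Spec_formTimelineText; infer_instance

-- ===== CLAIM (what is proved, stated in full; the proofs are below) =====
def Claim_equal_formTimelineText : Prop := ∀ (timeline : List (List (List String))), Dom_formTimelineText timeline → Spec_formTimelineText timeline (formTimelineText timeline)

-- ===== LEMMAS AND PROOFS =====

-- The items (unit names plus one blank per non-empty group), in order.
def pvItems (tl : List (List (List String))) : List (List Char) :=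
  tl.flatMap (fun turn => turn.flatMap (fun g =>
    if g = [] then [] else g.map String.toList ++ [[]]))

-- Join each element with a trailing newline.
def pvJ (ls : List (List Char)) : List Char := ls.flatMap (· ++ ['\n'])

-- Pure split on newline (shown equal to PySem.Chars.splitOn · ['\n'] below).
def pvSplitNL : List Char → List (List Char)
  | [] => [[]]
  | c :: rest =>
    if c = '\n' then [] :: pvSplitNL rest
    else (c :: (pvSplitNL rest).headD []) :: (pvSplitNL rest).tail

theorem pvSplitNL_ne_nil (s : List Char) : pvSplitNL s ≠ [] := by
  cases s with
  | nil => simp [pvSplitNL]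
  | cons c rest => simp only [pvSplitNL]; split <;> simp

theorem splitOn_go_eq (fuel : Nat) (s cur : List Char) (acc : List (List Char))
    (h : s.length < fuel) :
    PySem.Chars.splitOn.go ['\n'] fuel s cur acc =
      acc.reverse ++ (pvSplitNL s).modifyHead (cur.reverse ++ ·) := by
  induction fuel generalizing s cur acc with
  | zero => omega
  | succ n ih =>
    cases s with
    | nil => simp [PySem.Chars.splitOn.go, pvSplitNL]
    | cons c rest =>
      simp only [PySem.Chars.splitOn.go]
      by_cases hc : c = '\n'
      · subst hc
        rw [if_pos (by simp [List.isPrefixOf])]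
        rw [ih _ _ _ (by simpa using Nat.lt_of_succ_lt_succ h)]
        cases hsp : pvSplitNL rest <;> simp [pvSplitNL, hsp, List.modifyHead]
      · rw [if_neg (by simp [List.isPrefixOf, Ne.symm hc])]
        rw [ih _ _ _ (by simpa using Nat.lt_of_succ_lt_succ h)]
        have hnn := pvSplitNL_ne_nil rest
        cases hsp : pvSplitNL rest with
        | nil => exact absurd hsp hnn
        | cons p ps => simp [pvSplitNL, hc, hsp]

theorem splitOn_eq_pvSplitNL (s : List Char) :
    PySem.Chars.splitOn s ['\n'] = pvSplitNL s := by
  rw [PySem.Chars.splitOn, splitOn_go_eq _ _ _ _ (by omega)]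
  cases hsp : pvSplitNL s <;> simp [hsp, List.modifyHead]

theorem count_go_eq (fuel : Nat) (s : List Char) (acc : Nat) (h : s.length ≤ fuel) :
    PySem.Chars.count.go ['\n'] fuel s acc = acc + s.count '\n' := by
  induction fuel generalizing s acc with
  | zero => cases s with
    | nil => simp [PySem.Chars.count.go]
    | cons c rest => simp at h
  | succ n ih =>
    cases s with
    | nil => simp [PySem.Chars.count.go]
    | cons c rest =>
      simp only [PySem.Chars.count.go]
      by_cases hc : c = '\n'
      · subst hc
        rw [if_pos (by simp [List.isPrefixOf])]
        rw [ih _ _ (by simpa using Nat.le_of_succ_le_succ h)]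
        simp [List.count_cons]
        omega
      · rw [if_neg (by simp [List.isPrefixOf, Ne.symm hc])]
        rw [ih _ _ (by simpa using Nat.le_of_succ_le_succ h)]
        simp [List.count_cons, hc]

theorem count_NL_eq (s : List Char) :
    PySem.Chars.count s ['\n'] = s.count '\n' := by
  rw [PySem.Chars.count, if_neg (by simp), count_go_eq _ _ _ (le_refl _)]
  simp

theorem length_pvSplitNL (s : List Char) :
    (pvSplitNL s).length = s.count '\n' + 1 := by
  induction s with
  | nil => simp [pvSplitNL]
  | cons c rest ih =>
    simp only [pvSplitNL]
    by_cases hc : c = '\n'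
    · simp [hc, List.count_cons, ih]
    · have hnn := pvSplitNL_ne_nil rest
      cases hsp : pvSplitNL rest with
      | nil => exact absurd hsp hnn
      | cons p ps =>
        simp [hc, List.count_cons, hsp, ← ih, hsp]

theorem pvJ_pvSplitNL (s : List Char) : pvJ (pvSplitNL s) = s ++ ['\n'] := by
  induction s with
  | nil => simp [pvSplitNL, pvJ]
  | cons c rest ih =>
    simp only [pvSplitNL]
    by_cases hc : c = '\n'
    · simp [hc, pvJ] at ih ⊢; simp [ih]
    · have hnn := pvSplitNL_ne_nil rest
      cases hsp : pvSplitNL rest with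
      | nil => exact absurd hsp hnn
      | cons p ps =>
        rw [hsp] at ih
        simp only [pvJ, List.flatMap_cons] at ih ⊢
        simp [hc, hsp, ← List.append_assoc] at ih ⊢
        simpa using ih

theorem pvSplitNL_append_sep (a b : List Char) :
    pvSplitNL (a ++ '\n' :: b) = pvSplitNL a ++ pvSplitNL b := by
  induction a with
  | nil => simp [pvSplitNL]
  | cons c rest ih =>
    simp only [List.cons_append, pvSplitNL, ih]
    by_cases hc : c = '\n'
    · simp [hc]
    · have hnn := pvSplitNL_ne_nil rest
      cases hsp : pvSplitNL rest with
      | nil => exact absurd hsp hnn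
      | cons p ps => simp [hc, hsp]

theorem pvSplitNL_pvJ (items : List (List Char)) :
    pvSplitNL (pvJ items) = items.flatMap pvSplitNL ++ [[]] := by
  induction items with
  | nil => simp [pvJ, pvSplitNL]
  | cons x xs ih =>
    have : pvJ (x :: xs) = x ++ '\n' :: pvJ xs := by simp [pvJ]
    rw [this, pvSplitNL_append_sep, ih]
    simp [List.flatMap_cons, List.append_assoc]

theorem count_pvJ (items : List (List Char)) :
    (pvJ items).count '\n' = (items.flatMap pvSplitNL).length := by
  have h := length_pvSplitNL (pvJ items)
  rw [pvSplitNL_pvJ, List.length_append] at h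
  simp only [List.length_cons, List.length_nil] at h
  omega

theorem pvJ_flatMap_split (items : List (List Char)) :
    pvJ (items.flatMap pvSplitNL) = pvJ items := by
  induction items with
  | nil => simp [pvJ]
  | cons x xs ih =>
    simp only [List.flatMap_cons, pvJ, List.flatMap_append] at ih ⊢
    have := pvJ_pvSplitNL x
    simp only [pvJ] at this
    simp [this, ih]

theorem crop_foldl (xs : List (List Char)) (n : Nat) (h : n ≤ xs.length) :
    (PySem.List.pyRange 0 n 1).foldl
      (fun ft i => ft ++ PySem.List.pyGetD xs i [] ++ ['\n']) [] = pvJ (xs.take n) := by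
  induction n with
  | zero =>
    rw [show ((0 : Nat) : Int) = 0 from rfl, PySem.List.pyRange_one_eq_nil le_rfl]
    simp [pvJ]
  | succ m ih =>
    have hm : ((m + 1 : Nat) : Int) = (m : Int) + 1 := by push_cast; ring
    rw [hm, PySem.List.pyRange_one_succ_right (by positivity)]
    rw [List.foldl_append, ih (by omega)]
    rw [List.take_add_one]
    have hg : xs[m]? = some (xs.getD m []) := by
      have hm' : m < xs.length := by omega
      rw [List.getElem?_eq_getElem hm', List.getD_eq_getElem _ _ hm']
    rw [hg, List.foldl_cons, List.foldl_nil, PySem.List.pyGetD_natCast]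
    simp only [Option.toList_some, pvJ, List.flatMap_append, List.flatMap_cons,
      List.flatMap_nil, List.append_nil, List.append_assoc]

theorem text_eq_pvJ (tl : List (List (List String))) :
    tl.foldl (fun text turn =>
      turn.foldl (fun text group =>
        if group ≠ [] then
          (group.foldl (fun t (unit : String) => t ++ unit.toList ++ ['\n']) text) ++ ['\n']
        else text) text) [] = pvJ (pvItems tl) := by
  have inner : ∀ (g : List String) (t : List Char),
      g.foldl (fun t (unit : String) => t ++ unit.toList ++ ['\n']) t
        = t ++ pvJ (g.map String.toList) := by
    intro g
    induction g with
    | nil => intro t; simp [pvJ]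
    | cons u us ih =>
      intro t
      rw [List.foldl_cons, ih]
      simp [pvJ, List.append_assoc]
  have mid : ∀ (turn : List (List String)) (t : List Char),
      turn.foldl (fun text group =>
        if group ≠ [] then
          (group.foldl (fun t (unit : String) => t ++ unit.toList ++ ['\n']) text) ++ ['\n']
        else text) t
      = t ++ pvJ (turn.flatMap (fun g =>
          if g = [] then [] else g.map String.toList ++ [[]])) := by
    intro turn
    induction turn with
    | nil => intro t; simp [pvJ]
    | cons g gs ih =>
      intro t
      rw [List.foldl_cons]
      by_cases hg : g = []
      · rw [if_neg (by simp [hg]), ih]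
        simp [hg]
      · rw [if_pos hg, inner, ih]
        simp [pvJ, hg, List.flatMap_append, List.append_assoc]
  have outer : ∀ (tl : List (List (List String))) (t : List Char),
      tl.foldl (fun text turn =>
        turn.foldl (fun text group =>
          if group ≠ [] then
            (group.foldl (fun t (unit : String) => t ++ unit.toList ++ ['\n']) text) ++ ['\n']
          else text) text) t
      = t ++ pvJ (pvItems tl) := by
    intro tl
    induction tl with
    | nil => intro t; simp [pvItems, pvJ]
    | cons turn rest ih =>
      intro t
      rw [List.foldl_cons, mid, ih]
      simp [pvItems, pvJ, List.flatMap_append, List.append_assoc]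
  simpa using outer tl []

-- The generator's yielded lines are exactly the items split on newline.
theorem lines_eq (tl : List (List (List String))) :
    tl.flatMap (fun turn => turn.flatMap (fun group =>
      if group ≠ [] then
        group.flatMap (fun (unit : String) => PySem.Chars.splitOn unit.toList ['\n']) ++ [[]]
      else []))
    = (pvItems tl).flatMap pvSplitNL := by
  simp only [pvItems, List.flatMap_assoc]
  apply List.flatMap_congr; intro turn _
  apply List.flatMap_congr; intro g _
  by_cases hg : g = []
  · simp [hg]
  · simp [hg, List.flatMap_append, List.flatMap_map, splitOn_eq_pvSplitNL, pvSplitNL]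

-- The early-stopping consumer loop computes the first 40 lines, joined.
theorem pvTakeLoop_eq (lines : List (List Char)) :
    ∀ (out : List (List Char)), out.length < 40 →
      pvTakeLoop lines out = out ++ (lines.take (40 - out.length)).map (· ++ ['\n']) := by
  induction lines with
  | nil => intro out _; simp [pvTakeLoop]
  | cons l rest ih =>
    intro out hlt
    simp only [pvTakeLoop]
    by_cases h40 : (out ++ [l ++ ['\n']]).length = 40
    · rw [if_pos h40]
      have : 40 - out.length = 1 := by simp at h40; omega
      simp [this]
    · rw [if_neg h40]
      rw [ih _ (by simp at h40 ⊢; omega)]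
      have : 40 - out.length = (40 - (out ++ [l ++ ['\n']]).length) + 1 := by
        simp at h40 ⊢; omega
      rw [this]
      simp [List.take_succ_cons, List.append_assoc]

theorem flatten_map_eq_pvJ (ls : List (List Char)) :
    (ls.map (· ++ ['\n'])).flatten = pvJ ls := by
  simp [pvJ, List.flatMap]

-- ===== VERDICT (by name: the statement is the Claim_ definition above) =====
theorem formTimelineText_spec : Claim_equal_formTimelineText := by
  intro tl _
  unfold Spec_formTimelineText formTimelineText formTimelineText_alt
  simp only [text_eq_pvJ, lines_eq, count_NL_eq, count_pvJ]
  rw [pvTakeLoop_eq _ [] (by norm_num)]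
  simp only [List.nil_append, List.length_nil, Nat.sub_zero, flatten_map_eq_pvJ]
  set items := pvItems tl with hitems
  set L := items.flatMap pvSplitNL with hL
  by_cases hbig : L.length > 40
  · rw [if_pos hbig]
    rw [splitOn_eq_pvSplitNL, pvSplitNL_pvJ, ← hL]
    have h40 : (40 : Int) = ((40 : Nat) : Int) := by norm_num
    rw [h40, crop_foldl (L ++ [[]]) 40 (by simp; omega)]
    rw [List.take_append_of_le_length (by omega)]
  · rw [if_neg hbig]
    have htake : L.take 40 = L := List.take_of_length_le (by omega)
    rw [htake, pvJ_flatMap_split]
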